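-- pv_equiv track=rewrite | github.com/Mr-juhyun/study-algorithm | 프로그래머스/2/92342. 양궁대회/양궁대회.py | solution
-- ===== SOURCE A (Python) =====
-- def solution(n, info):
--     ryan_score = [[n,0]]
--     max_difference = 0
--     for idx in range(len(info)):
--         apeach_shot = info[idx]
--         temp = []
--         score = 10-idx
--
--         for ryan_shot in ryan_score:
--             diff = ryan_shot.pop()
--             shot_count = ryan_shot.pop()
--
--             if idx == 10:
--                 if diff >= max_difference:
--                     temp.append(ryan_shot + [shot_count]+[diff])
--                     max_difference = diff
--
--             else:
--
--                 if apeach_shot > 0: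
--                     diff -= score
--                     temp.append(ryan_shot+[0]+[shot_count]+[diff])
--                     diff += score
--
--                 else: temp.append(ryan_shot +[0]+[shot_count]+[diff])
--
--                 if apeach_shot + 1 <= shot_count:
--                     diff += score
--                     shot_count -= apeach_shot +1
--                     temp.append(ryan_shot + [apeach_shot+1]+[shot_count]+[diff])
--
--         ryan_score = temp
--
--     ryan_score.sort(key=lambda x: x[::-1],reverse=True)
--
--     if not ryan_score or ryan_score[0].pop() <= 0:
--         return [-1]
--
--     return ryan_score[0]
-- ===== SOURCE B (Python) =====
-- def solution(n, info):
--     # Depth-first backtracking with an explicit stack (instead of A's level-by-level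
--     # breadth-first lists), collecting full candidate states, then a single max() pass
--     # with the reversed-vector key instead of sorting all candidates.
--     results = []
--     max_difference = 0
--     # frame: (remaining (apeach, idx) pairs, rings chosen so far, arrows left, diff)
--     stack = [(list(enumerate(info)), [], n, 0)]
--     while stack:
--         rem, rings, shot, diff = stack.pop()
--         if not rem:
--             results.append(rings + [shot, diff])
--             continue
--         idx, apeach = rem[0]
--         rest = rem[1:]
--         if idx == 10:
--             if diff >= max_difference:
--                 max_difference = diff
--                 stack.append((rest, rings, shot, diff))
--             continue
--         score = 10 - idx
--         # push the 'win' branch first so the 'lose' branch is explored first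
--         if apeach + 1 <= shot:
--             stack.append((rest, rings + [apeach + 1], shot - (apeach + 1), diff + score))
--         stack.append((rest, rings + [0], shot, diff - score if apeach > 0 else diff))
--     if not results:
--         return [-1]
--     best = max(results, key=lambda v: v[::-1])
--     if best.pop() <= 0:
--         return [-1]
--     return best
-- ===== Notes on version B (the rewrite author's own statement) =====
-- stated objective: alternative
-- what changed: A builds the whole breadth-first level list of partial states ring by ring (decomposing every state with pop/pop and re-concatenating it each level) and finally sorts all candidates by the reversed vector; B does an explicit-stack depth-first backtracking over (remaining rings, chosen rings, arrows left, diff) frames, collecting each complete candidate once, and picks the winner with a single max pass under the same reversed-vector key.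
import Mathlib
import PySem

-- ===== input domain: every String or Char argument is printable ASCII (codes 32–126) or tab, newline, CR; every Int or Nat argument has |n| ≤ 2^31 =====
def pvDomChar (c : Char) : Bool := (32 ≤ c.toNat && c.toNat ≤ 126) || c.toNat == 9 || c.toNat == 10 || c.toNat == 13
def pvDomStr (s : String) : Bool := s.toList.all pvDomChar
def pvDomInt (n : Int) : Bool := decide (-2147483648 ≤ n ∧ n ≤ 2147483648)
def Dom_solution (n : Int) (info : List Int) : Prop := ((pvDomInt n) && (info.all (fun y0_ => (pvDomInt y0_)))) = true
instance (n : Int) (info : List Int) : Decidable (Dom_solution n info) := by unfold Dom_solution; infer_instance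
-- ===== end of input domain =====

-- B replaces A's level-by-level breadth-first state lists + full sort with an explicit-stack
-- depth-first backtracking that collects candidates once and picks the best by a single
-- max pass (objective: alternative decomposition; same exact return value, A is total).

-- ===== PORT A =====
-- Python list.pop(): returns the last element and the list without it.
-- The (0, []) branch is Python's IndexError case; A never reaches it (its states
-- always have at least two elements) — the guard only makes the port total.
def pvPop (xs : List Int) : Int × List Int :=
  match xs.reverse with
  | v :: t => (v, t.reverse)
  | [] => (0, [])

-- body of A's inner `for ryan_shot in ryan_score` loop; acc = (temp, max_difference)
def aStep (idx : Nat) (ap : Int) (acc : List (List Int) × Int) (st : List Int) :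
    List (List Int) × Int :=
  let diff := (pvPop st).1
  let st1 := (pvPop st).2
  let shot := (pvPop st1).1
  let rings := (pvPop st1).2
  let score : Int := 10 - (idx : Int)
  if idx = 10 then
    if acc.2 ≤ diff then (acc.1 ++ [rings ++ [shot, diff]], diff) else acc
  else
    let t1 := if 0 < ap then acc.1 ++ [rings ++ [0, shot, diff - score]]
              else acc.1 ++ [rings ++ [0, shot, diff]]
    if ap + 1 ≤ shot then (t1 ++ [rings ++ [ap + 1, shot - (ap + 1), diff + score]], acc.2)
    else (t1, acc.2)

-- one pass of the inner loop: (temp, new max_difference)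
def aLevel (idx : Nat) (ap : Int) (states : List (List Int)) (maxd : Int) :
    List (List Int) × Int :=
  states.foldl (aStep idx ap) ([], maxd)

-- A's outer `for idx in range(len(info))` loop; `info[idx]` is fetched by folding
-- over `info.zipIdx` (the (value, index) pairs), which is exactly what A reads.
def aLoop : List (Int × Nat) → List (List Int) → Int → List (List Int) × Int
  | [], states, maxd => (states, maxd)
  | (ap, idx) :: rest, states, maxd =>
      aLoop rest (aLevel idx ap states maxd).1 (aLevel idx ap states maxd).2

-- key x[::-1] is List.reverse (PySem.List.slice?_none_none_neg_one)
def solution (n : Int) (info : List Int) : List Int :=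
  match PySem.List.sorted (aLoop info.zipIdx [[n, 0]] 0).1 (fun x => x.reverse) true with
  | [] => [-1]
  | h :: _ => if (pvPop h).1 ≤ 0 then [-1] else (pvPop h).2

-- ===== PORT B =====
-- a stack frame of Source B: (remaining (apeach, idx) pairs, rings so far, arrows left, diff)
-- (Python's enumerate order (idx, apeach) is carried here as (apeach, idx) pairs of zipIdx.)
-- Python's stack list grows/pops at the right end; the cons-list below keeps the top first,
-- so pushing win then lose becomes `lose :: win :: rest`.
abbrev bFrame : Type := List (Int × Nat) × List Int × Int × Int

def bWeight (f : bFrame) : Nat := 3 ^ (f.1.length + 1)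

def bLoop (stack : List bFrame) (results : List (List Int)) (maxd : Int) :
    List (List Int) × Int :=
  match stack with
  | [] => (results, maxd)
  | (rem, rings, shot, diff) :: rest =>
    match rem with
    | [] => bLoop rest (results ++ [rings ++ [shot, diff]]) maxd
    | (ap, idx) :: rem' =>
      if idx = 10 then
        if maxd ≤ diff then bLoop (((rem', rings, shot, diff) : bFrame) :: rest) results diff
        else bLoop rest results maxd
      else
        let score : Int := 10 - (idx : Int)
        let diffL := if 0 < ap then diff - score else diff
        let winStack := if ap + 1 ≤ shot then
            ((rem', rings ++ [ap + 1], shot - (ap + 1), diff + score) : bFrame) :: rest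
          else rest
        bLoop (((rem', rings ++ [0], shot, diffL) : bFrame) :: winStack) results maxd
termination_by (stack.map bWeight).sum
decreasing_by
  all_goals try simp [bWeight, Nat.pow_succ]
  all_goals try split
  all_goals try simp [bWeight, Nat.pow_succ]
  all_goals have h1 : 0 < 3 ^ ((rem' : List (Int × Nat)).length) := Nat.pow_pos (by omega)
  all_goals omega

def solution_alt (n : Int) (info : List Int) : List Int :=
  match PySem.List.max? (bLoop [(info.zipIdx, [], n, 0)] [] 0).1 (fun v => v.reverse) with
  | none => [-1]                                   -- `if not results: return [-1]`
  | some best => if (pvPop best).1 ≤ 0 then [-1] else (pvPop best).2  -- best.pop()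

-- ===== PRECONDITION & SPEC =====
def Spec_solution (n : Int) (info : List Int) (out : List Int) : Prop := out = solution_alt n info
instance (n : Int) (info : List Int) (out : List Int) : Decidable (Spec_solution n info out) := by unfold Spec_solution; infer_instance

-- ===== CLAIM (what is proved, stated in full; the proofs are below) =====
def Claim_equal_solution : Prop := ∀ (n : Int) (info : List Int), Dom_solution n info → Spec_solution n info (solution n info)

-- ===== LEMMAS AND PROOFS =====

-- recursive depth-first search; bLoop's stack discipline computes exactly this
def bGo : List (Int × Nat) → List Int → Int → Int → Int → List (List Int) × Int
  | [], rings, shot, diff, maxd => ([rings ++ [shot, diff]], maxd)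
  | (ap, idx) :: rest, rings, shot, diff, maxd =>
    if idx = 10 then
      if maxd ≤ diff then bGo rest rings shot diff diff else ([], maxd)
    else
      let score : Int := 10 - (idx : Int)
      let diffL := if 0 < ap then diff - score else diff
      let r1 := bGo rest (rings ++ [0]) shot diffL maxd
      if ap + 1 ≤ shot then
        let r2 := bGo rest (rings ++ [ap + 1]) (shot - (ap + 1)) (diff + score) r1.2
        (r1.1 ++ r2.1, r2.2)
      else r1

-- run the DFS from each state of a BFS level, threading max_difference
def dStep (rem : List (Int × Nat)) (acc : List (List Int) × Int) (st : List Int) :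
    List (List Int) × Int :=
  let r := bGo rem (pvPop (pvPop st).2).2 (pvPop (pvPop st).2).1 (pvPop st).1 acc.2
  (acc.1 ++ r.1, r.2)

def dfsAll (rem : List (Int × Nat)) (states : List (List Int)) (maxd : Int) :
    List (List Int) × Int :=
  states.foldl (dStep rem) ([], maxd)

-- the children a state spawns at a non-final ring (independent of max_difference there)
def chl (idx : Nat) (ap : Int) (st : List Int) : List (List Int) :=
  (aStep idx ap ([], 0) st).1

lemma pvPop_append (ys : List Int) (v : Int) : pvPop (ys ++ [v]) = (v, ys) := by
  simp [pvPop]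

lemma pvPop_app2 (R : List Int) (a b : Int) : pvPop (R ++ [a, b]) = (b, R ++ [a]) := by
  simp [pvPop]

lemma pvPop_app3 (R : List Int) (a b c : Int) : pvPop (R ++ [a, b, c]) = (c, R ++ [a, b]) := by
  simp [pvPop]

lemma recompose (st : List Int) (h : 2 ≤ st.length) :
    (pvPop (pvPop st).2).2 ++ [(pvPop (pvPop st).2).1, (pvPop st).1] = st := by
  rcases hrev : st.reverse with _ | ⟨b, _ | ⟨a, r⟩⟩
  · exfalso; rw [List.reverse_eq_nil_iff] at hrev; simp [hrev] at h
  · exfalso; have := congrArg List.length hrev; simp at this; omega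
  · have hst : st = r.reverse ++ [a, b] := by
      have := congrArg List.reverse hrev; simpa using this
    simp [pvPop, hrev]
    exact hst.symm

lemma foldl_factor {β γ : Type} (f : (List γ × Int) → β → List γ × Int)
    (Hf : ∀ T m x, f (T, m) x = (T ++ (f ([], m) x).1, (f ([], m) x).2)) :
    ∀ (l : List β) (T : List γ) (m : Int),
      l.foldl f (T, m) = (T ++ (l.foldl f ([], m)).1, (l.foldl f ([], m)).2) := by
  intro l
  induction l with
  | nil => intro T m; simp
  | cons x l ih =>
    intro T m
    simp only [List.foldl_cons]
    rcases hfx : f ([], m) x with ⟨g, m2⟩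
    rw [Hf T m x, hfx]
    rw [ih (T ++ g) m2, ih g m2]
    simp

lemma aStep_factor (idx : Nat) (ap : Int) :
    ∀ T m st, aStep idx ap (T, m) st = (T ++ (aStep idx ap ([], m) st).1, (aStep idx ap ([], m) st).2) := by
  intro T m st
  simp only [aStep]
  split_ifs <;> simp

lemma dStep_factor (rem : List (Int × Nat)) :
    ∀ T m st, dStep rem (T, m) st = (T ++ (dStep rem ([], m) st).1, (dStep rem ([], m) st).2) := by
  intro T m st
  simp [dStep]

lemma aStep_snd_ne10 (idx : Nat) (ap : Int) (h : idx ≠ 10) (acc : List (List Int) × Int) (st : List Int) :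
    (aStep idx ap acc st).2 = acc.2 := by
  simp only [aStep]
  rw [if_neg h]
  split_ifs <;> simp

lemma aStep_fst_ne10 (idx : Nat) (ap : Int) (h : idx ≠ 10) (T : List (List Int)) (m : Int) (st : List Int) :
    (aStep idx ap (T, m) st).1 = T ++ chl idx ap st := by
  simp only [aStep, chl]
  rw [if_neg h, if_neg h]
  split_ifs <;> simp

lemma aStep_mem_len (idx : Nat) (ap : Int) (m : Int) (st x : List Int)
    (hx : x ∈ (aStep idx ap ([], m) st).1) : 2 ≤ x.length := by
  simp only [aStep] at hx
  split_ifs at hx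
  all_goals simp at hx
  all_goals first
    | (rcases hx with hx | hx <;> subst hx <;> simp)
    | (subst hx; simp)

lemma aLevel_mem_len (idx : Nat) (ap : Int) (states : List (List Int)) (m : Int) (x : List Int)
    (hx : x ∈ (aLevel idx ap states m).1) : 2 ≤ x.length := by
  unfold aLevel at hx
  induction states generalizing m x with
  | nil => simp at hx
  | cons st tl ih =>
    simp only [List.foldl_cons] at hx
    rcases haS : aStep idx ap ([], m) st with ⟨T1, m1⟩
    rw [aStep_factor, haS] at hx
    rw [foldl_factor _ (aStep_factor idx ap)] at hx
    simp at hx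
    rcases hx with hx | hx
    · have := aStep_mem_len idx ap m st x (by rw [haS]; exact hx)
      exact this
    · exact ih m1 x hx

lemma bGo_no10 (rem : List (Int × Nat)) (h : ∀ p ∈ rem, p.2 ≠ 10) :
    ∀ rings shot diff m, bGo rem rings shot diff m = ((bGo rem rings shot diff 0).1, m) := by
  induction rem with
  | nil => intro rings shot diff m; simp [bGo]
  | cons p rest ih =>
    rcases p with ⟨ap, idx⟩
    intro rings shot diff m
    have hidx : idx ≠ 10 := h (ap, idx) (List.mem_cons_self ..)
    have hrest : ∀ p ∈ rest, p.2 ≠ 10 := fun q hq => h q (List.mem_cons_of_mem _ hq)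
    have e1 := ih hrest (rings ++ [0]) shot (diff - (10 - (idx : Int))) m
    have e2 := ih hrest (rings ++ [0]) shot diff m
    have e3 := ih hrest (rings ++ [ap + 1]) (shot - (ap + 1)) (diff + (10 - (idx : Int))) m
    have s1 : (bGo rest (rings ++ [0]) shot (diff - (10 - (idx : Int))) 0).2 = 0 :=
      (congrArg Prod.snd (ih hrest _ _ _ 0)).trans rfl
    have s2 : (bGo rest (rings ++ [0]) shot diff 0).2 = 0 :=
      (congrArg Prod.snd (ih hrest _ _ _ 0)).trans rfl
    simp only [bGo, if_neg hidx]
    split_ifs <;> simp [e1, e2, e3, s1, s2]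

lemma bGo_no10_snd (rem : List (Int × Nat)) (h : ∀ p ∈ rem, p.2 ≠ 10)
    (rings : List Int) (shot diff m : Int) : (bGo rem rings shot diff m).2 = m := by
  rw [bGo_no10 rem h]

lemma bGo_no10_fst (rem : List (Int × Nat)) (h : ∀ p ∈ rem, p.2 ≠ 10)
    (rings : List Int) (shot diff m m' : Int) :
    (bGo rem rings shot diff m).1 = (bGo rem rings shot diff m').1 := by
  rw [bGo_no10 rem h rings shot diff m]
  rw [bGo_no10 rem h rings shot diff m']

lemma dfsAll_append (rem : List (Int × Nat)) (xs ys : List (List Int)) (m : Int) :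
    dfsAll rem (xs ++ ys) m
      = ((dfsAll rem xs m).1 ++ (dfsAll rem ys (dfsAll rem xs m).2).1,
         (dfsAll rem ys (dfsAll rem xs m).2).2) := by
  unfold dfsAll
  rw [List.foldl_append]
  rcases hxs : xs.foldl (dStep rem) ([], m) with ⟨T1, m1⟩
  rw [foldl_factor _ (dStep_factor rem) ys T1 m1]

-- one state at a non-final ring: its DFS subtree = DFS from its two (or one) children
lemma step_ne10 (ap : Int) (idx : Nat) (h : idx ≠ 10) (rest : List (Int × Nat)) (st : List Int) (m : Int) :
    dStep ((ap, idx) :: rest) ([], m) st = dfsAll rest (chl idx ap st) m := by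
  by_cases hap : 0 < ap <;>
    by_cases hw : ap + 1 ≤ (pvPop (pvPop st).2).1 <;>
    simp [dStep, dfsAll, chl, aStep, bGo, if_neg h, hap, hw, pvPop_app3, pvPop_app2]

lemma aLevel_ne10 (idx : Nat) (ap : Int) (h : idx ≠ 10) (states : List (List Int)) (m : Int) :
    aLevel idx ap states m = (states.flatMap (chl idx ap), m) := by
  induction states with
  | nil => simp [aLevel]
  | cons st tl ih =>
    have hstep : aStep idx ap ([], m) st = (chl idx ap st, m) := by
      have h1 := aStep_fst_ne10 idx ap h [] m st
      have h2 := aStep_snd_ne10 idx ap h ([], m) st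
      rcases haS : aStep idx ap ([], m) st with ⟨T1, m1⟩
      rw [haS] at h1 h2; simp at h1 h2; simp [h1, h2]
    unfold aLevel at ih ⊢
    simp only [List.foldl_cons, hstep]
    rw [foldl_factor _ (aStep_factor idx ap) tl (chl idx ap st) m, ih]
    simp

lemma dfsAll_cons_ne10 (ap : Int) (idx : Nat) (h : idx ≠ 10) (rest : List (Int × Nat))
    (states : List (List Int)) (m : Int) :
    dfsAll ((ap, idx) :: rest) states m = dfsAll rest (states.flatMap (chl idx ap)) m := by
  induction states generalizing m with
  | nil => simp [dfsAll]
  | cons st tl ih =>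
    have hstep := step_ne10 ap idx h rest st m
    simp only [List.flatMap_cons]
    rw [dfsAll_append rest (chl idx ap st) (tl.flatMap (chl idx ap)) m]
    show (List.foldl (dStep ((ap, idx) :: rest)) (dStep ((ap, idx) :: rest) ([], m) st) tl) = _
    rw [hstep]
    rcases hc : dfsAll rest (chl idx ap st) m with ⟨C, m1⟩
    rw [foldl_factor _ (dStep_factor _) tl C m1]
    have ihm := ih m1
    unfold dfsAll at ihm
    rw [ihm]
    simp [dfsAll]

lemma dfsAll_cons_10 (ap : Int) (rest : List (Int × Nat)) (h : ∀ p ∈ rest, p.2 ≠ 10)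
    (states : List (List Int)) (m : Int) :
    dfsAll ((ap, 10) :: rest) states m
      = dfsAll rest (aLevel 10 ap states m).1 (aLevel 10 ap states m).2 := by
  induction states generalizing m with
  | nil => simp [dfsAll, aLevel]
  | cons st tl ih =>
    have hd : dStep ((ap, 10) :: rest) ([], m) st
        = if m ≤ (pvPop st).1
          then ((bGo rest (pvPop (pvPop st).2).2 (pvPop (pvPop st).2).1 (pvPop st).1 ((pvPop st).1)).1, (pvPop st).1)
          else ([], m) := by
      simp only [dStep, bGo]
      split_ifs <;> simp [bGo_no10_snd rest h]
    have ha : aStep 10 ap ([], m) st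
        = if m ≤ (pvPop st).1
          then ([(pvPop (pvPop st).2).2 ++ [(pvPop (pvPop st).2).1, (pvPop st).1]], (pvPop st).1)
          else ([], m) := by
      simp only [aStep]
      split_ifs <;> simp
    unfold dfsAll aLevel
    simp only [List.foldl_cons]
    rw [hd, ha]
    by_cases hle : m ≤ (pvPop st).1
    · rw [if_pos hle, if_pos hle]
      rw [foldl_factor _ (dStep_factor _) tl _ ((pvPop st).1),
          foldl_factor _ (aStep_factor 10 ap) tl _ ((pvPop st).1)]
      have ihm := ih ((pvPop st).1)
      unfold dfsAll aLevel at ihm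
      rw [ihm]
      -- both sides: prefix ++ dfsAll rest (level tl) …
      rcases hlv : List.foldl (aStep 10 ap) ([], (pvPop st).1) tl with ⟨L, mL⟩
      -- RHS: dfsAll rest (c :: L) mL; LHS: bGo-subtree ++ dfsAll rest L mL
      have hc2 : dStep rest ([], mL) ((pvPop (pvPop st).2).2 ++ [(pvPop (pvPop st).2).1, (pvPop st).1])
          = ((bGo rest (pvPop (pvPop st).2).2 (pvPop (pvPop st).2).1 (pvPop st).1 mL).1, mL) := by
        simp [dStep, pvPop_app2, pvPop_append, bGo_no10_snd rest h]
      rw [List.singleton_append, List.foldl_cons, hc2]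
      rw [foldl_factor _ (dStep_factor _) L _ mL]
      rw [foldl_factor _ (dStep_factor rest) L
        ((bGo rest (pvPop (pvPop st).2).2 (pvPop (pvPop st).2).1 (pvPop st).1 mL).1) mL]
      have hfst := bGo_no10_fst rest h (pvPop (pvPop st).2).2 (pvPop (pvPop st).2).1 (pvPop st).1 ((pvPop st).1) mL
      simp [hfst]
    · rw [if_neg hle, if_neg hle]
      exact ih m

lemma dfsAll_nil (states : List (List Int)) (m : Int) (h : ∀ st ∈ states, 2 ≤ st.length) :
    dfsAll [] states m = (states, m) := by
  induction states with
  | nil => simp [dfsAll]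
  | cons st tl ih =>
    have hst : 2 ≤ st.length := h st (List.mem_cons_self ..)
    have htl : ∀ x ∈ tl, 2 ≤ x.length := fun x hx => h x (List.mem_cons_of_mem _ hx)
    unfold dfsAll
    simp only [List.foldl_cons]
    have hd : dStep [] ([], m) st = ([st], m) := by
      simp [dStep, bGo, recompose st hst]
    rw [hd, foldl_factor _ (dStep_factor _) tl [st] m]
    have := ih htl
    unfold dfsAll at this
    rw [this]
    simp

lemma aLoop_eq_dfsAll : ∀ (rem : List (Int × Nat)), rem.countP (fun p => p.2 == 10) ≤ 1 →
    ∀ states maxd, (∀ st ∈ states, 2 ≤ st.length) → aLoop rem states maxd = dfsAll rem states maxd := by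
  intro rem
  induction rem with
  | nil =>
    intro _ states maxd h
    rw [dfsAll_nil states maxd h]
    rfl
  | cons p rest ih =>
    rcases p with ⟨ap, idx⟩
    intro hcnt states maxd h
    by_cases hidx : idx = 10
    · subst hidx
      have hc0 : rest.countP (fun p => p.2 == 10) = 0 := by
        rw [List.countP_cons] at hcnt
        simp only [beq_self_eq_true, if_true] at hcnt
        omega
      have hrest : ∀ p ∈ rest, p.2 ≠ 10 := by
        intro q hq
        have := List.countP_eq_zero.mp hc0 q hq
        simpa using this
      show aLoop rest (aLevel 10 ap states maxd).1 (aLevel 10 ap states maxd).2 = _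
      rw [ih (by omega) _ _ (fun x hx => aLevel_mem_len 10 ap states maxd x hx)]
      rw [dfsAll_cons_10 ap rest hrest states maxd]
    · have hcnt' : rest.countP (fun p => p.2 == 10) ≤ 1 := by
        rw [List.countP_cons] at hcnt
        omega
      show aLoop rest (aLevel idx ap states maxd).1 (aLevel idx ap states maxd).2 = _
      rw [ih hcnt' _ _ (fun x hx => aLevel_mem_len idx ap states maxd x hx)]
      rw [aLevel_ne10 idx ap hidx states maxd]
      rw [dfsAll_cons_ne10 ap idx hidx rest states maxd]

lemma zipIdx_countP (info : List Int) :
    (info.zipIdx).countP (fun p => p.2 == 10) ≤ 1 := by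
  have aux0 : ∀ (l : List Int) (k j : Nat), j < k → (l.zipIdx k).countP (fun p => p.2 == j) = 0 := by
    intro l
    induction l with
    | nil => intro k j _; simp
    | cons x l ih =>
      intro k j hj
      simp only [List.zipIdx_cons, List.countP_cons]
      rw [ih (k + 1) j (by omega)]
      simp
      omega
  have aux1 : ∀ (l : List Int) (k : Nat), (l.zipIdx k).countP (fun p => p.2 == 10) ≤ 1 := by
    intro l
    induction l with
    | nil => intro k; simp
    | cons x l ih =>
      intro k
      simp only [List.zipIdx_cons, List.countP_cons]
      by_cases hk : k = 10
      · subst hk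
        rw [aux0 l 11 10 (by omega)]
        simp
      · have := ih (k + 1)
        simp [hk]
        omega
  exact aux1 info 0

lemma bLoop_frames : ∀ (rem : List (Int × Nat)) (rings : List Int) (shot diff : Int)
    (rest : List bFrame) (results : List (List Int)) (maxd : Int),
    bLoop (((rem, rings, shot, diff) : bFrame) :: rest) results maxd
      = bLoop rest (results ++ (bGo rem rings shot diff maxd).1) (bGo rem rings shot diff maxd).2 := by
  intro rem
  induction rem with
  | nil =>
    intro rings shot diff rest results maxd
    conv_lhs => rw [bLoop.eq_def]
    simp [bGo]
  | cons p rem' ih =>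
    rcases p with ⟨ap, idx⟩
    intro rings shot diff rest results maxd
    conv_lhs => rw [bLoop.eq_def]
    by_cases hidx : idx = 10
    · subst hidx
      by_cases hle : maxd ≤ diff
      · simp only [reduceIte, if_pos hle, ih]
        simp [bGo, hle]
      · simp only [reduceIte, if_neg hle]
        simp [bGo, hle]
    · by_cases hw : ap + 1 ≤ shot
      · simp only [if_neg hidx, if_pos hw, ih]
        simp [bGo, hidx, hw]
      · simp only [if_neg hidx, if_neg hw, ih]
        simp [bGo, hidx, hw]

lemma results_eq (n : Int) (info : List Int) :
    (aLoop info.zipIdx [[n, 0]] 0).1 = (bLoop [(info.zipIdx, [], n, 0)] [] 0).1 := by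
  rw [aLoop_eq_dfsAll info.zipIdx (zipIdx_countP info) [[n, 0]] 0
    (by intro st hst; simp at hst; simp [hst])]
  rw [bLoop_frames info.zipIdx [] n 0 [] [] 0]
  rw [bLoop]
  simp [dfsAll, dStep, pvPop]

lemma head_eq_max (l : List (List Int)) (h m : List Int) (t : List (List Int))
    (hs : PySem.List.sorted l (fun x => x.reverse) true = h :: t)
    (hm : PySem.List.max? l (fun x => x.reverse) = some m) : h = m := by
  have hs' : @PySem.List.sorted (List Int) (List Int)
      (List.instLinearOrder.toLT) (List.instLinearOrder.toDecidableLT)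
      l (fun x => x.reverse) true = h :: t := by
    rw [← hs]; congr 1
  have hm' : @PySem.List.max? (List Int) (List Int)
      (List.instLinearOrder.toLT) (List.instLinearOrder.toDecidableLT)
      l (fun x => x.reverse) = some m := by
    rw [← hm]; congr 1
  have h1 := PySem.List.key_head_sorted_rev_ge l (fun x => x.reverse) hs'
  have h2 := PySem.List.max?_isMax hm'
  have hmem : m ∈ l := @PySem.List.max?_mem (List Int) (List Int)
    List.instLinearOrder.toLT List.instLinearOrder.toDecidableLT l (fun x => x.reverse) m hm'
  have hhmem : h ∈ l := by
    have := (PySem.List.sorted_perm l (fun x : List Int => x.reverse) true).mem_iff (a := h)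
    rw [hs] at this
    exact this.mp (List.mem_cons_self ..)
  have : h.reverse = m.reverse := le_antisymm (h2 h hhmem) (h1 m hmem)
  exact List.reverse_injective this

-- ===== VERDICT (by name: the statement is the Claim_ definition above) =====
theorem solution_spec : Claim_equal_solution := by
  intro n info _
  unfold Spec_solution solution solution_alt
  rw [results_eq n info]
  cases hsort : PySem.List.sorted (bLoop [(info.zipIdx, [], n, 0)] [] 0).1 (fun x => x.reverse) true with
  | nil =>
    have hR : (bLoop [(info.zipIdx, [], n, 0)] [] 0).1 = [] :=
      (PySem.List.sorted_eq_nil_iff _ _ _).mp hsort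
    have hmax : PySem.List.max? (bLoop [(info.zipIdx, [], n, 0)] [] 0).1 (fun v => v.reverse) = none :=
      (PySem.List.max?_eq_none_iff _ _).mpr hR
    rw [hmax]
  | cons h t =>
    have hR : (bLoop [(info.zipIdx, [], n, 0)] [] 0).1 ≠ [] := by
      intro e
      rw [(PySem.List.sorted_eq_nil_iff _ _ _).mpr e] at hsort
      simp at hsort
    rcases hmax : PySem.List.max? (bLoop [(info.zipIdx, [], n, 0)] [] 0).1 (fun v => v.reverse) with _ | m
    · exact absurd ((PySem.List.max?_eq_none_iff _ _).mp hmax) hR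
    · rw [head_eq_max _ h m t hsort hmax]
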